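-- pv_equiv track=rewrite | github.com/openstack-archive/os-log-merger | oslogmerger/oslogmerger.py | reduce_strings
-- ===== SOURCE A (Python) =====
-- def reduce_strings(strings):
--     num_strs = len(strings)
--     if num_strs == 1:
--         return {strings[0]: strings[0][-1]}
--
--     # Convert each string to a list
--     str_list = [list(s) for s in strings]
--     result = [s.pop() for s in str_list]
--
--     while len(set(result)) != num_strs:
--         for i, s in enumerate(str_list):
--             if s:
--                 letter = s.pop()
--                 str_list[i].insert(0, letter)
--                 result[i] = letter + result[i]
--     result = [''.join(r) for r in result]
--     return {strings[i]: s for i, s in enumerate(result)}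
-- ===== SOURCE B (Python) =====
-- def reduce_strings(strings):
--     n = len(strings)
--
--     def suffix(s, m):
--         # last m characters of the leftward periodic extension  ... p p s,  p = s[:-1]
--         if len(s) <= 1 or m <= len(s):
--             return s[max(len(s) - m, 0):]
--         p = s[:-1]
--         q = (m - len(s) + len(p) - 1) // len(p)
--         return (p * q + s)[len(p) * q + len(s) - m:]
--
--     def distinct(m):
--         return len({suffix(s, m) for s in strings}) == n
--
--     lo, hi = 1, 2 * sum(map(len, strings)) + 1
--     while lo < hi:
--         mid = (lo + hi) // 2
--         if distinct(mid):
--             hi = mid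
--         else:
--             lo = mid + 1
--     return {s: suffix(s, lo) for s in strings}
-- ===== Notes on version B (the rewrite author's own statement) =====
-- stated objective: alternative
-- what changed: Replaces A's mutating pop/insert state machine that grows all suffixes one character per round until distinct with a direct closed-form suffix-of-the-periodic-extension formula plus a binary search on the suffix length (distinctness is monotone in the length).
-- outside the precondition, e.g. on reduce_strings(['']): A raises IndexError, B returns {'': ''}
import Mathlib
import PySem

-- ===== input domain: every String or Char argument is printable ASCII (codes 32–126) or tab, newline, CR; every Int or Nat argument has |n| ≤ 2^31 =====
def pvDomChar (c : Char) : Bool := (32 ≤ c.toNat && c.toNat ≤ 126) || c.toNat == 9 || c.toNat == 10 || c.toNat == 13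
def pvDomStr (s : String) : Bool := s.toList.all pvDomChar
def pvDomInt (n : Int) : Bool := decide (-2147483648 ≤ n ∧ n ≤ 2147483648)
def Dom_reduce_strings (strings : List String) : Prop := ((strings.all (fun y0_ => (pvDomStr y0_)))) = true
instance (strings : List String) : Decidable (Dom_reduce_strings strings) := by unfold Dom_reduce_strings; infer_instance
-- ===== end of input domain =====

-- B replaces A's mutating pop/insert state machine (grow every suffix by one char per round
-- until all distinct) by a closed-form "suffix of the periodic extension" formula plus a
-- binary search on the suffix length; objective: alternative algorithm, same results.

-- ===== PORT A =====
-- One while-iteration of A: for each (str_list[i], result[i]), if str_list[i] is nonempty,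
-- letter = str_list[i].pop(); str_list[i].insert(0, letter); result[i] = letter + result[i].
def rsStep (st : List (List Char × List Char)) : List (List Char × List Char) :=
  st.map (fun p =>
    if p.1.isEmpty then p
    else
      let letter := p.1.getLastD default
      (letter :: p.1.dropLast, letter :: p.2))

-- A's `while len(set(result)) != num_strs` loop; fuel makes it total (the Python loop
-- diverges on some inputs; Pre_ guarantees it stops within the fuel supplied below).
def rsLoop (n : Nat) : Nat → List (List Char × List Char) → List (List Char × List Char)
  | 0, st => st
  | fuel+1, st =>
    if (PySem.Set.ofList (st.map (·.2))).length ≠ n then rsLoop n fuel (rsStep st) else st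

def reduce_strings (strings : List String) : List (String × String) :=
  let num_strs := strings.length
  if num_strs = 1 then
    ((PySem.Dict.empty.insert (PySem.List.pyGetD strings 0 default)
        (String.ofList [PySem.List.pyGetD (PySem.List.pyGetD strings 0 default).toList (-1) default])).items)
  else
    -- str_list = [list(s) for s in strings]; result = [s.pop() for s in str_list]
    let st0 := strings.map (fun s => (s.toList.dropLast, [s.toList.getLastD default]))
    let st := rsLoop num_strs (2 * (strings.map (fun s => s.toList.length)).sum + 1) st0
    -- result = [''.join(r) for r in result]; return {strings[i]: s for i, s in enumerate(result)}
    ((PySem.List.enumerate (st.map (fun p => String.ofList p.2))).foldl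
        (fun d q => d.insert (PySem.List.pyGetD strings q.1 default) q.2) PySem.Dict.empty).items

-- ===== PORT B =====
-- suffix(s, m): the last m characters of the leftward periodic extension ... p p s, p = s[:-1]
def rsSuffix (cs : List Char) (m : Nat) : List Char :=
  if cs.length ≤ 1 || m ≤ cs.length then cs.drop (cs.length - m)
  else
    let p := cs.dropLast
    let q := (m - cs.length + p.length - 1) / p.length
    ((List.replicate q p).flatten ++ cs).drop (p.length * q + cs.length - m)

def rsDistinct (strings : List String) (m : Nat) : Bool :=
  (PySem.Set.ofList (strings.map (fun s => String.ofList (rsSuffix s.toList m)))).length == strings.length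

-- binary search: smallest L in [lo, hi] with all suffixes of length L distinct
def rsSearch (strings : List String) (lo hi : Nat) : Nat :=
  if lo < hi then
    let mid := (lo + hi) / 2
    if rsDistinct strings mid then rsSearch strings lo mid
    else rsSearch strings (mid + 1) hi
  else lo
termination_by hi - lo
decreasing_by all_goals omega

def reduce_strings_alt (strings : List String) : List (String × String) :=
  let L := rsSearch strings 1 (2 * (strings.map (fun s => s.toList.length)).sum + 1)
  (strings.foldl (fun d s => d.insert s (String.ofList (rsSuffix s.toList L))) PySem.Dict.empty).items

-- ===== PRECONDITION & SPEC =====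
-- last m chars of the leftward periodic extension of cs (independent definition for Pre_)
def pvExt (cs : List Char) (m : Nat) : List Char :=
  if cs.length ≤ 1 then cs
  else
    let w := (List.replicate m cs.dropLast).flatten ++ cs
    w.drop (w.length - m)

-- Pre_ excludes exactly the inputs on which the Python A does not return: an empty string
-- (IndexError on s[-1]/pop) and lists whose periodic extensions collide forever (e.g. duplicate
-- strings, or ["aa","aaa"]), on which A's while loop never terminates.
def Pre_reduce_strings (strings : List String) : Prop :=
  (∀ s ∈ strings, s ≠ "") ∧
  (strings.map (fun s =>
      pvExt s.toList (2 * (strings.map (fun s => s.toList.length)).sum + 1))).Nodup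

instance (strings : List String) : Decidable (Pre_reduce_strings strings) := by
  unfold Pre_reduce_strings; infer_instance

def pvWitness_reduce_strings : List String := ["ab", "b"]

def Spec_reduce_strings (strings : List String) (out : List (String × String)) : Prop := out = reduce_strings_alt strings
instance (strings : List String) (out : List (String × String)) : Decidable (Spec_reduce_strings strings out) := by unfold Spec_reduce_strings; infer_instance

-- ===== CLAIM (what is proved, stated in full; the proofs are below) =====
def Claim_equal_reduce_strings : Prop := ∀ (strings : List String), Dom_reduce_strings strings → Pre_reduce_strings strings → Spec_reduce_strings strings (reduce_strings strings)

-- ===== LEMMAS AND PROOFS =====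

theorem pv_getLastD_eq {α : Type} [Inhabited α] (l : List α) (h : l ≠ []) :
    l.getLastD default = l.getLast h := by
  rw [List.getLastD_eq_getLast?, List.getLast?_eq_getLast_of_ne_nil h]
  rfl

theorem pv_rot_eq_rotate {α : Type} [Inhabited α] (l : List α) (h : l ≠ []) :
    l.getLastD default :: l.dropLast = l.rotate (l.length - 1) := by
  rw [List.rotate_eq_drop_append_take (Nat.sub_le _ _), List.drop_length_sub_one h,
    ← List.dropLast_eq_take, pv_getLastD_eq l h]
  rfl

theorem pv_flatten_replicate_getD {α : Type} [Inhabited α] (P : List α) (Q j : Nat)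
    (hP : P ≠ []) (hj : j < Q * P.length) :
    ((List.replicate Q P).flatten).getD j default = P.getD (j % P.length) default := by
  induction Q generalizing j with
  | zero => simp at hj
  | succ Q ih =>
      rw [List.replicate_succ, List.flatten_cons]
      have hL : 0 < P.length := List.length_pos_iff.mpr hP
      by_cases hjP : j < P.length
      · rw [List.getD_append _ _ _ _ hjP, Nat.mod_eq_of_lt hjP]
      · push_neg at hjP
        rw [List.getD_append_right _ _ _ _ hjP]
        have hj' : j - P.length < Q * P.length := by
          have : (Q + 1) * P.length = Q * P.length + P.length := by ring
          omega
        rw [ih _ hj']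
        congr 1
        conv_rhs => rw [show j = (j - P.length) + P.length by omega]
        rw [Nat.add_mod_right]

theorem pv_stab (cs : List Char) (hn : 2 ≤ cs.length) (Q m : Nat) (h1 : 1 ≤ m)
    (h2 : m ≤ Q * cs.dropLast.length + cs.length) :
    ((List.replicate Q cs.dropLast).flatten ++ cs).drop (Q * cs.dropLast.length + cs.length - m)
      = rsSuffix cs m := by
  have hdl : cs.dropLast.length = cs.length - 1 := List.length_dropLast
  induction Q generalizing m with
  | zero =>
      simp only [List.replicate_zero, List.flatten_nil, List.nil_append, Nat.zero_mul,
        Nat.zero_add] at *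
      simp only [rsSuffix]
      rw [if_pos]
      simp only [Bool.or_eq_true, decide_eq_true_eq]
      right; omega
  | succ Q ih =>
      have hL : 0 < cs.dropLast.length := by omega
      by_cases hm : m ≤ Q * cs.dropLast.length + cs.length
      · rw [← ih m h1 hm]
        rw [List.replicate_succ, List.flatten_cons, List.append_assoc]
        have hidx : (Q + 1) * cs.dropLast.length + cs.length - m
            = cs.dropLast.length + (Q * cs.dropLast.length + cs.length - m) := by
          have e1 : (Q + 1) * cs.dropLast.length
              = Q * cs.dropLast.length + cs.dropLast.length := by ring
          omega
        rw [hidx, List.drop_append, List.drop_eq_nil_of_le (by omega), List.nil_append]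
        congr 1
        omega
      · push_neg at hm
        have e1 : (Q + 1) * cs.dropLast.length
            = Q * cs.dropLast.length + cs.dropLast.length := by ring
        have hmn : cs.length < m := by omega
        simp only [rsSuffix]
        rw [if_neg]
        · have hq : (m - cs.length + cs.dropLast.length - 1) / cs.dropLast.length = Q + 1 := by
            apply Nat.le_antisymm
            · have hlt : (m - cs.length + cs.dropLast.length - 1) / cs.dropLast.length
                  < Q + 2 := by
                rw [Nat.div_lt_iff_lt_mul hL]
                have e2 : (Q + 2) * cs.dropLast.length
                    = Q * cs.dropLast.length + cs.dropLast.length + cs.dropLast.length := by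
                  ring
                omega
              omega
            · rw [Nat.le_div_iff_mul_le hL]
              omega
          rw [hq]
          rw [Nat.mul_comm cs.dropLast.length (Q + 1)]
        · simp only [Bool.or_eq_true, decide_eq_true_eq]
          push_neg
          constructor <;> omega

theorem pv_sfx_one (cs : List Char) (h : cs ≠ []) :
    rsSuffix cs 1 = [cs.getLastD default] := by
  have h0 : 0 < cs.length := List.length_pos_iff.mpr h
  simp only [rsSuffix]
  rw [if_pos (by simp; omega), List.drop_length_sub_one h, pv_getLastD_eq cs h]

theorem pv_mod_lem (L u v c : Nat) (hL : 0 < L) (h : u + v + 1 = c * L) :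
    u % L = L - 1 - v % L := by
  obtain ⟨a, r, hrL, hv⟩ : ∃ a r, r < L ∧ v = L * a + r :=
    ⟨v / L, v % L, Nat.mod_lt _ hL, (Nat.div_add_mod v L).symm⟩
  have hvmod : v % L = r := by rw [hv, Nat.mul_add_mod, Nat.mod_eq_of_lt hrL]
  have hcomm : L * a = a * L := Nat.mul_comm _ _
  have hac : a < c := Nat.lt_of_mul_lt_mul_right (by omega : a * L < c * L)
  obtain ⟨b, hb⟩ : ∃ b, c = a + 1 + b := ⟨c - (a + 1), by omega⟩
  subst hb
  have e3 : (a + 1 + b) * L = a * L + L + b * L := by ring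
  have key : u = (L - 1 - r) + b * L := by omega
  rw [hvmod, key, Nat.add_mul_mod_self_right, Nat.mod_eq_of_lt (by omega)]

theorem pv_sfx_cons (cs : List Char) (hn : 2 ≤ cs.length) (t : Nat) :
    rsSuffix cs (t+2)
      = cs.dropLast.getD (cs.dropLast.length - 1 - t % cs.dropLast.length) default
          :: rsSuffix cs (t+1) := by
  have hLn : cs.dropLast.length = cs.length - 1 := List.length_dropLast
  set L := cs.dropLast.length with hLdef
  have hL : 0 < L := by omega
  have hmul : t + 2 ≤ (t + 2) * L := Nat.le_mul_of_pos_right (t + 2) hL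
  have hb2 : t + 2 ≤ (t + 2) * L + cs.length := by omega
  have hb1 : t + 1 ≤ (t + 2) * L + cs.length := by omega
  rw [← pv_stab cs hn (t + 2) (t + 2) (by omega) hb2,
      ← pv_stab cs hn (t + 2) (t + 1) (by omega) hb1]
  set W := (List.replicate (t + 2) cs.dropLast).flatten ++ cs with hWdef
  have hFlen : (List.replicate (t + 2) cs.dropLast).flatten.length = (t + 2) * L := by
    rw [List.length_flatten, List.map_replicate, List.sum_replicate, smul_eq_mul]
  have hWlen : W.length = (t + 2) * L + cs.length := by
    rw [hWdef, List.length_append, hFlen]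
  have hj : (t + 2) * L + cs.length - (t + 2) < W.length := by omega
  rw [List.drop_eq_getElem_cons hj]
  have htl : (t + 2) * L + cs.length - (t + 2) + 1 = (t + 2) * L + cs.length - (t + 1) := by
    omega
  rw [htl]
  congr 1
  rw [← List.getD_eq_getElem W default hj]
  by_cases hsm : t + 2 ≤ cs.length
  · -- index falls inside the cs part of W
    have hge : (List.replicate (t + 2) cs.dropLast).flatten.length
        ≤ (t + 2) * L + cs.length - (t + 2) := by omega
    rw [hWdef, List.getD_append_right _ _ _ _ hge, hFlen]
    have htL : t % L = t := Nat.mod_eq_of_lt (by omega)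
    have hidx : (t + 2) * L + cs.length - (t + 2) - (t + 2) * L = cs.length - (t + 2) := by
      omega
    rw [hidx, htL]
    have hlt : cs.length - (t + 2) < cs.length := by omega
    have hlt' : L - 1 - t < L := by omega
    rw [List.getD_eq_getElem _ _ hlt, List.getD_eq_getElem _ _ (by omega : L - 1 - t < cs.dropLast.length)]
    rw [List.getElem_dropLast]
    congr 1
    omega
  · -- index falls inside the replicated part of W
    push_neg at hsm
    have hjF : (t + 2) * L + cs.length - (t + 2) < (t + 2) * L := by omega
    rw [hWdef, List.getD_append _ _ _ _ (by rw [hFlen]; exact hjF)]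
    rw [pv_flatten_replicate_getD cs.dropLast (t + 2) _ (by
        intro hc; rw [hc] at hLdef; simp at hLdef; omega) hjF]
    congr 1
    apply pv_mod_lem L _ t (t + 3) hL
    have e1 : (t + 3) * L = (t + 2) * L + L := by ring
    omega

theorem pv_sfx_len (cs : List Char) (hn : 2 ≤ cs.length) (m : Nat) (h1 : 1 ≤ m) :
    (rsSuffix cs m).length = m := by
  have hLn : cs.dropLast.length = cs.length - 1 := List.length_dropLast
  have hL : 0 < cs.dropLast.length := by omega
  have hmul : m ≤ m * cs.dropLast.length := Nat.le_mul_of_pos_right m hL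
  have hb : m ≤ m * cs.dropLast.length + cs.length := by omega
  rw [← pv_stab cs hn m m h1 hb, List.length_drop, List.length_append, List.length_flatten,
    List.map_replicate, List.sum_replicate, smul_eq_mul]
  omega

theorem pv_rotate_getLastD {α : Type} [Inhabited α] (P : List α) (hP : P ≠ []) (t : Nat) :
    (P.rotate (t * (P.length - 1))).getLastD default
      = P.getD (P.length - 1 - t % P.length) default := by
  have hL : 0 < P.length := List.length_pos_iff.mpr hP
  have hlen : (P.rotate (t * (P.length - 1))).length = P.length := List.length_rotate _ _
  have hx : P.rotate (t * (P.length - 1)) ≠ [] := by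
    intro hc
    rw [hc] at hlen
    simp at hlen
    omega
  rw [pv_getLastD_eq _ hx, List.getLast_eq_getElem, List.getElem_rotate]
  have hmod : ((P.rotate (t * (P.length - 1))).length - 1 + t * (P.length - 1)) % P.length
      = P.length - 1 - t % P.length := by
    rw [hlen]
    have e : P.length - 1 + t * (P.length - 1) = (t + 1) * (P.length - 1) := by
      have e2 : (t + 1) * (P.length - 1) = t * (P.length - 1) + (P.length - 1) := by ring
      omega
    rw [e]
    apply pv_mod_lem P.length _ t (t + 1) hL
    have e3 : (t + 1) * P.length = (t + 1) * (P.length - 1) + (t + 1) * 1 := by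
      rw [← Nat.mul_add]
      congr 1
      omega
    omega
  have hlt : ((P.rotate (t * (P.length - 1))).length - 1 + t * (P.length - 1)) % P.length
      < P.length := Nat.mod_lt _ hL
  rw [← List.getD_eq_getElem P default hlt, hmod]

-- invariant state of A's loop after t while-iterations, per string
def rsInv (s : String) (t : Nat) : List Char × List Char :=
  if s.toList.length ≤ 1 then (s.toList.dropLast, s.toList)
  else ((s.toList.dropLast).rotate (t * (s.toList.length - 2)), rsSuffix s.toList (t+1))

abbrev rsGood (strings : List String) (m : Nat) : Prop :=
  (strings.map (fun s => rsSuffix s.toList m)).Nodup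

theorem pv_sfx_small (cs : List Char) (hl : cs.length ≤ 1) (m : Nat) (h1 : 1 ≤ m) :
    rsSuffix cs m = cs := by
  simp only [rsSuffix]
  rw [if_pos (by simp; omega)]
  have h0 : cs.length - m = 0 := by omega
  rw [h0, List.drop_zero]

theorem pv_inv_init (strings : List String) (hne : ∀ s ∈ strings, s ≠ "") :
    strings.map (fun s => (s.toList.dropLast, [s.toList.getLastD default]))
      = strings.map (fun s => rsInv s 0) := by
  apply List.map_congr_left
  intro s hs
  have hsn : s.toList ≠ [] := by
    intro hc
    exact hne s hs (by rwa [String.toList_eq_nil_iff] at hc)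
  unfold rsInv
  by_cases hl : s.toList.length ≤ 1
  · rw [if_pos hl]
    have h1 : s.toList.length = 1 := by
      have := List.length_pos_iff.mpr hsn; omega
    obtain ⟨a, ha⟩ := List.length_eq_one_iff.mp h1
    simp [ha]
  · rw [if_neg hl]
    rw [Nat.zero_mul, List.rotate_zero, pv_sfx_one s.toList hsn]

theorem pv_inv_step (strings : List String) (hne : ∀ s ∈ strings, s ≠ "") (t : Nat) :
    rsStep (strings.map (fun s => rsInv s t)) = strings.map (fun s => rsInv s (t+1)) := by
  unfold rsStep
  rw [List.map_map]
  apply List.map_congr_left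
  intro s hs
  have hsn : s.toList ≠ [] := by
    intro hc
    exact hne s hs (by rwa [String.toList_eq_nil_iff] at hc)
  simp only [Function.comp]
  by_cases hl : s.toList.length ≤ 1
  · have h1 : s.toList.length = 1 := by
      have := List.length_pos_iff.mpr hsn; omega
    obtain ⟨a, ha⟩ := List.length_eq_one_iff.mp h1
    simp [rsInv, ha]
  · push_neg at hl
    simp only [rsInv, if_neg (by omega : ¬ s.toList.length ≤ 1)]
    have hLlen : s.toList.dropLast.length = s.toList.length - 1 := List.length_dropLast
    have hPne : s.toList.dropLast ≠ [] :=
      List.ne_nil_of_length_pos (by omega : 0 < s.toList.dropLast.length)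
    have hrotlen : (s.toList.dropLast.rotate (t * (s.toList.length - 2))).length
        = s.toList.dropLast.length := List.length_rotate _ _
    have hxne : s.toList.dropLast.rotate (t * (s.toList.length - 2)) ≠ [] :=
      List.ne_nil_of_length_pos (by rw [hrotlen]; omega)
    rw [if_neg (by simp [List.isEmpty_iff, hxne, hPne])]
    have hmm : s.toList.length - 2 = s.toList.dropLast.length - 1 := by omega
    refine Prod.ext ?_ ?_
    · show (s.toList.dropLast.rotate (t * (s.toList.length - 2))).getLastD default
          :: (s.toList.dropLast.rotate (t * (s.toList.length - 2))).dropLast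
        = s.toList.dropLast.rotate ((t+1) * (s.toList.length - 2))
      rw [pv_rot_eq_rotate _ hxne, List.rotate_rotate, hrotlen]
      congr 1
      have e1 : (t + 1) * (s.toList.length - 2) = t * (s.toList.length - 2)
          + (s.toList.length - 2) := by ring
      omega
    · show (s.toList.dropLast.rotate (t * (s.toList.length - 2))).getLastD default
          :: rsSuffix s.toList (t+1) = rsSuffix s.toList (t+2)
      rw [hmm, pv_rotate_getLastD s.toList.dropLast hPne t]
      exact (pv_sfx_cons s.toList (by omega) t).symm

theorem pv_inv_snd (strings : List String) (hne : ∀ s ∈ strings, s ≠ "") (t : Nat) :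
    (strings.map (fun s => rsInv s t)).map (·.2)
      = strings.map (fun s => rsSuffix s.toList (t+1)) := by
  rw [List.map_map]
  apply List.map_congr_left
  intro s hs
  have hsn : s.toList ≠ [] := by
    intro hc
    exact hne s hs (by rwa [String.toList_eq_nil_iff] at hc)
  simp only [Function.comp]
  by_cases hl : s.toList.length ≤ 1
  · simp only [rsInv, if_pos hl]
    exact (pv_sfx_small s.toList hl (t+1) (by omega)).symm
  · simp only [rsInv, if_neg hl]

theorem pv_setlen_iff {α : Type} [DecidableEq α] [BEq α] [LawfulBEq α] (l : List α) :
    (PySem.Set.ofList l).length = l.length ↔ l.Nodup := by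
  constructor
  · intro h
    have h1 : (PySem.Set.ofList l).toFinset = l.toFinset := by
      ext x; simp [List.mem_toFinset, PySem.Set.mem_ofList]
    have h1c := congrArg Finset.card h1
    have h2 := List.toFinset_card_of_nodup (PySem.Set.nodup_ofList l)
    have h3 := List.card_toFinset l
    have hd : l.dedup.length = l.length := by omega
    have := (List.dedup_sublist l).eq_of_length hd
    rw [← this]
    exact List.nodup_dedup l
  · intro h
    rw [PySem.Set.ofList_eq_self_of_nodup l h]

theorem pv_cond_bridge (strings : List String) (m : Nat) :
    rsDistinct strings m = true ↔ rsGood strings m := by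
  unfold rsDistinct rsGood
  have hinj : Function.Injective String.ofList := fun a b hab => by
    have := congrArg String.toList hab
    simpa [String.toList_ofList] using this
  have key : strings.map (fun s => String.ofList (rsSuffix s.toList m))
      = (strings.map (fun s => rsSuffix s.toList m)).map String.ofList := by
    rw [List.map_map]
    exact List.map_congr_left (fun s _ => rfl)
  rw [beq_iff_eq, key]
  rw [show strings.length
      = ((strings.map (fun s => rsSuffix s.toList m)).map String.ofList).length by
    simp]
  rw [pv_setlen_iff]
  exact List.nodup_map_iff hinj

theorem pv_good_mono (strings : List String) (hne : ∀ s ∈ strings, s ≠ "") (m : Nat)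
    (h1 : 1 ≤ m) (hg : rsGood strings m) : rsGood strings (m+1) := by
  unfold rsGood at hg ⊢
  rw [List.Nodup, List.pairwise_map] at hg ⊢
  refine hg.imp_of_mem ?_
  intro a b ha hb hab heq
  apply hab
  have hna : a.toList ≠ [] := by
    intro hc; exact hne a ha (by rwa [String.toList_eq_nil_iff] at hc)
  have hnb : b.toList ≠ [] := by
    intro hc; exact hne b hb (by rwa [String.toList_eq_nil_iff] at hc)
  by_cases hla : a.toList.length ≤ 1 <;> by_cases hlb : b.toList.length ≤ 1
  · rw [pv_sfx_small _ hla _ (by omega), pv_sfx_small _ hlb _ (by omega)] at heq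
    rw [pv_sfx_small _ hla _ h1, pv_sfx_small _ hlb _ h1, heq]
  · exfalso
    have e1 : (rsSuffix a.toList (m+1)).length = 1 := by
      rw [pv_sfx_small _ hla _ (by omega)]
      have := List.length_pos_iff.mpr hna; omega
    have e2 : (rsSuffix b.toList (m+1)).length = m + 1 :=
      pv_sfx_len b.toList (by omega) (m+1) (by omega)
    rw [heq, e2] at e1
    omega
  · exfalso
    have e1 : (rsSuffix b.toList (m+1)).length = 1 := by
      rw [pv_sfx_small _ hlb _ (by omega)]
      have := List.length_pos_iff.mpr hnb; omega
    have e2 : (rsSuffix a.toList (m+1)).length = m + 1 :=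
      pv_sfx_len a.toList (by omega) (m+1) (by omega)
    rw [← heq, e2] at e1
    omega
  · obtain ⟨t, rfl⟩ : ∃ t, m = t + 1 := ⟨m - 1, by omega⟩
    rw [show t + 1 + 1 = t + 2 from rfl, pv_sfx_cons a.toList (by omega) t,
      pv_sfx_cons b.toList (by omega) t] at heq
    exact (List.cons_eq_cons.mp heq).2

theorem pv_good_mono' (strings : List String) (hne : ∀ s ∈ strings, s ≠ "") (a b : Nat)
    (h1 : 1 ≤ a) (hab : a ≤ b) (hg : rsGood strings a) : rsGood strings b := by
  induction b, hab using Nat.le_induction with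
  | base => exact hg
  | succ n hn ih => exact pv_good_mono strings hne n (by omega) ih

theorem pv_loop_run (strings : List String) (hne : ∀ s ∈ strings, s ≠ "") (T : Nat)
    (hT : rsGood strings (T+1)) (hmin : ∀ u, u < T → ¬ rsGood strings (u+1)) :
    ∀ f t, t ≤ T → T ≤ t + f →
      rsLoop strings.length f (strings.map (fun s => rsInv s t))
        = strings.map (fun s => rsInv s T) := by
  intro f
  induction f with
  | zero =>
      intro t h1 h2
      have : t = T := by omega
      subst this
      rfl
  | succ f ih =>
      intro t h1 h2
      have hcond : ((PySem.Set.ofList ((strings.map (fun s => rsInv s t)).map (·.2))).length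
          = strings.length) ↔ rsGood strings (t+1) := by
        rw [pv_inv_snd strings hne t]
        rw [show strings.length
            = (strings.map (fun s => rsSuffix s.toList (t+1))).length by simp]
        exact pv_setlen_iff _
      rw [rsLoop]
      by_cases ht : t = T
      · subst ht
        rw [if_neg (fun hc => hc (hcond.mpr hT))]
      · have htT : t < T := by omega
        rw [if_pos (fun hc => hmin t htT (hcond.mp hc))]
        rw [pv_inv_step strings hne t]
        exact ih (t+1) (by omega) (by omega)

theorem pv_search_eq (strings : List String) (hne : ∀ s ∈ strings, s ≠ "") (M : Nat)
    (hM : 1 ≤ M) (hg : rsGood strings M) (hmin : ∀ m, 1 ≤ m → m < M → ¬ rsGood strings m) :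
    ∀ lo hi, 1 ≤ lo → lo ≤ M → M ≤ hi → rsSearch strings lo hi = M := by
  have main : ∀ k lo hi, hi - lo ≤ k → 1 ≤ lo → lo ≤ M → M ≤ hi →
      rsSearch strings lo hi = M := by
    intro k
    induction k with
    | zero =>
        intro lo hi h0 h1 h2 h3
        rw [rsSearch, if_neg (by omega)]
        omega
    | succ k ih =>
        intro lo hi h0 h1 h2 h3
        by_cases hlh : lo < hi
        · rw [rsSearch, if_pos hlh]
          show (if rsDistinct strings ((lo + hi) / 2) then rsSearch strings lo ((lo + hi) / 2)
              else rsSearch strings ((lo + hi) / 2 + 1) hi) = M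
          by_cases hd : rsDistinct strings ((lo + hi) / 2)
          · rw [if_pos hd]
            have hgood : rsGood strings ((lo + hi) / 2) :=
              (pv_cond_bridge strings _).mp hd
            have hMm : M ≤ (lo + hi) / 2 := by
              by_contra hc
              push_neg at hc
              exact hmin _ (by omega) hc hgood
            exact ih lo _ (by omega) h1 h2 hMm
          · rw [if_neg hd]
            have hng : ¬ rsGood strings ((lo + hi) / 2) :=
              fun hgg => hd ((pv_cond_bridge strings _).mpr hgg)
            have hMm : (lo + hi) / 2 < M := by
              by_contra hc
              push_neg at hc
              exact hng (pv_good_mono' strings hne M _ hM hc hg)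
            exact ih _ hi (by omega) (by omega) (by omega) h3
        · rw [rsSearch, if_neg hlh]
          omega
  intro lo hi h1 h2 h3
  exact main (hi - lo) lo hi le_rfl h1 h2 h3

theorem pv_pvExt_eq (cs : List Char) (h : cs ≠ []) (m : Nat) (h1 : 1 ≤ m) :
    pvExt cs m = rsSuffix cs m := by
  unfold pvExt
  by_cases hl : cs.length ≤ 1
  · rw [if_pos hl]
    exact (pv_sfx_small cs hl m h1).symm
  · push_neg at hl
    rw [if_neg (by omega)]
    show ((List.replicate m cs.dropLast).flatten ++ cs).drop
        (((List.replicate m cs.dropLast).flatten ++ cs).length - m) = rsSuffix cs m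
    have hdl : cs.dropLast.length = cs.length - 1 := List.length_dropLast
    have hlen : ((List.replicate m cs.dropLast).flatten ++ cs).length
        = m * cs.dropLast.length + cs.length := by
      rw [List.length_append, List.length_flatten, List.map_replicate, List.sum_replicate,
        smul_eq_mul]
    rw [hlen]
    exact pv_stab cs (by omega) m m h1
      (by have := Nat.le_mul_of_pos_right m (by omega : 0 < cs.dropLast.length); omega)

theorem pv_dictB (strings : List String) (g : String → String) (hnd : strings.Nodup) :
    (strings.foldl (fun d s => d.insert s (g s)) PySem.Dict.empty).items
      = strings.map (fun s => (s, g s)) := by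
  have h := PySem.Dict.items_foldl_insert_fresh strings (fun s => s) g PySem.Dict.empty
    (fun a _ => PySem.Dict.contains_empty a) (by simpa using hnd)
  simpa using h

theorem pv_dictA (strings : List String) (g : String → String) (hnd : strings.Nodup) :
    ((PySem.List.enumerate (strings.map g)).foldl
        (fun d q => d.insert (PySem.List.pyGetD strings q.1 default) q.2)
        PySem.Dict.empty).items
      = strings.map (fun s => (s, g s)) := by
  have hmapk : (PySem.List.enumerate (strings.map g)).map
      (fun q => PySem.List.pyGetD strings q.1 default) = strings := by
    apply List.ext_getElem
    · rw [List.length_map, PySem.List.length_enumerate, List.length_map]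
    · intro i h1 h2
      rw [List.getElem_map, PySem.List.getElem_enumerate]
      simp only [zero_add, PySem.List.pyGetD_natCast]
      exact (List.getD_eq_getElem _ _ h2)
  have hfresh : ∀ a ∈ PySem.List.enumerate (strings.map g),
      (PySem.Dict.empty : PySem.Dict String String).contains
        (PySem.List.pyGetD strings a.1 default) = false :=
    fun a _ => PySem.Dict.contains_empty _
  have hnd2 : ((PySem.List.enumerate (strings.map g)).map
      (fun q => PySem.List.pyGetD strings q.1 default)).Nodup := by
    rw [hmapk]; exact hnd
  rw [PySem.Dict.items_foldl_insert_fresh (PySem.List.enumerate (strings.map g))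
    (fun q => PySem.List.pyGetD strings q.1 default) (fun q => q.2) PySem.Dict.empty
    hfresh hnd2]
  rw [show (PySem.Dict.empty : PySem.Dict String String).items = [] from rfl, List.nil_append]
  apply List.ext_getElem
  · simp [PySem.List.length_enumerate]
  · intro i hi1 hi2
    rw [List.getElem_map, PySem.List.getElem_enumerate]
    simp only [zero_add, PySem.List.pyGetD_natCast, List.getElem_map]
    rw [List.getD_eq_getElem _ _ (by simpa using hi2)]

-- ===== VERDICT (by name: the statement is the Claim_ definition above) =====
theorem reduce_strings_spec : Claim_equal_reduce_strings := by
  intro strings _hdom hpre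
  unfold Spec_reduce_strings
  obtain ⟨hne, hnodup_ext⟩ := hpre
  have hnel : ∀ s ∈ strings, s.toList ≠ [] := by
    intro s hs hc
    exact hne s hs (by rwa [String.toList_eq_nil_iff] at hc)
  set HI := 2 * (strings.map (fun s => s.toList.length)).sum + 1 with hHI
  have hgoodHI : rsGood strings HI := by
    unfold rsGood
    rw [List.map_congr_left (fun s hs =>
      (pv_pvExt_eq s.toList (hnel s hs) HI (by omega)).symm : ∀ s ∈ strings,
        rsSuffix s.toList HI = pvExt s.toList HI)]
    exact hnodup_ext
  have hstr_nodup : strings.Nodup := List.Nodup.of_map _ hgoodHI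
  have hPex : ∃ u, rsGood strings (u+1) :=
    ⟨HI - 1, by rwa [show HI - 1 + 1 = HI by omega]⟩
  set T := Nat.find hPex with hT
  have hTgood : rsGood strings (T+1) := Nat.find_spec hPex
  have hTmin : ∀ u, u < T → ¬ rsGood strings (u+1) := fun u hu => Nat.find_min hPex hu
  have hTle : T ≤ HI - 1 := Nat.find_min' hPex (by rwa [show HI - 1 + 1 = HI by omega])
  have hM1 : ∀ m, 1 ≤ m → m < T + 1 → ¬ rsGood strings m := by
    intro m hm1 hm2
    obtain ⟨u, rfl⟩ : ∃ u, m = u + 1 := ⟨m - 1, by omega⟩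
    exact hTmin u (by omega)
  have hsearch : rsSearch strings 1 HI = T + 1 :=
    pv_search_eq strings hne (T+1) (by omega) hTgood hM1 1 HI le_rfl (by omega) (by omega)
  have hB : reduce_strings_alt strings
      = strings.map (fun s => (s, String.ofList (rsSuffix s.toList (T+1)))) := by
    show (strings.foldl (fun d s => d.insert s (String.ofList (rsSuffix s.toList
        (rsSearch strings 1 (2 * (strings.map (fun s => s.toList.length)).sum + 1)))))
        PySem.Dict.empty).items = _
    rw [← hHI, hsearch]
    exact pv_dictB strings _ hstr_nodup
  by_cases hn1 : strings.length = 1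
  · obtain ⟨s, rfl⟩ := List.length_eq_one_iff.mp hn1
    have hsn : s.toList ≠ [] := hnel s (by simp)
    have hT0 : T = 0 := by
      rw [hT, Nat.find_eq_zero]
      simp [rsGood]
    rw [hB, hT0]
    show (PySem.Dict.empty.insert (PySem.List.pyGetD [s] 0 default)
        (String.ofList [PySem.List.pyGetD (PySem.List.pyGetD [s] 0 default).toList
          (-1) default])).items = _
    rw [PySem.List.pyGetD_zero_cons]
    rw [PySem.List.pyGetD_neg_one _ _ hsn]
    rw [PySem.Dict.items_insert_of_not_contains _ _ (PySem.Dict.contains_empty _)]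
    rw [show (PySem.Dict.empty : PySem.Dict String String).items = [] from rfl,
      List.nil_append]
    simp only [List.map_cons, List.map_nil]
    rw [pv_sfx_one s.toList hsn, pv_getLastD_eq s.toList hsn]
  · show (if strings.length = 1 then _ else _ : List (String × String)) = _
    rw [if_neg hn1]
    rw [pv_inv_init strings hne, ← hHI]
    rw [pv_loop_run strings hne T hTgood hTmin HI 0 (by omega) (by omega)]
    have hsnd2 : (strings.map (fun s => rsInv s T)).map (fun p => String.ofList p.2)
        = strings.map (fun s => String.ofList (rsSuffix s.toList (T+1))) := by
      rw [List.map_map]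
      apply List.map_congr_left
      intro s hs
      show String.ofList ((rsInv s T).2) = _
      by_cases hl : s.toList.length ≤ 1
      · simp only [rsInv, if_pos hl]
        rw [pv_sfx_small s.toList hl (T+1) (by omega)]
      · simp only [rsInv, if_neg hl]
    rw [hsnd2]
    rw [pv_dictA strings (fun s => String.ofList (rsSuffix s.toList (T+1))) hstr_nodup]
    rw [hB]
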